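-- pv_equiv track=rewrite | github.com/valentk777/Competitive-Programming | Codeforces/Python/_Regular Rounds/Codeforces Round #835 (Div. 4)/F.py | calculate
-- ===== SOURCE A (Python) =====
-- import math
--
-- def calculate(d, a, c, take):
--     _sum = 0
--     _max_days = 0
--
--     for i in range(math.ceil(d // take)):
--         for j in range(take):
--             _sum += a[j]
--
--             if _sum >= c:
--                 return (d // (i + 1)) - take + 1
--
--     return 0
-- ===== SOURCE B (Python) =====
-- def calculate(d, a, c, take):
--     passes = d // take
--     if passes <= 0 or take <= 0:
--         return 0
--     # single scan of the window: running sum s, max prefix sum M; crossing in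
--     # the very first pass returns immediately (i = 0)
--     s = 0
--     M = None
--     for j in range(take):
--         s += a[j]
--         if s >= c:
--             return d - take + 1
--         M = s if M is None else max(M, s)
--     if s <= 0:
--         return 0
--     # first crossing pass i >= 1 satisfies i*s + M >= c; smallest is ceil((c-M)/s)
--     q = -((M - c) // s)
--     if q <= passes - 1:
--         return d // (q + 1) - take + 1
--     return 0
-- ===== Notes on version B (the rewrite author's own statement) =====
-- stated objective: alternative
-- what changed: A re-sums the same take-element window once per pass (up to d//take passes) until the running sum reaches c; B scans the window once to get its sum S and max prefix sum M, returns immediately on a pass-0 crossing, and otherwise locates the first crossing pass directly with the ceiling division q = ceil((c-M)/S) instead of iterating over passes.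
import Mathlib
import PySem

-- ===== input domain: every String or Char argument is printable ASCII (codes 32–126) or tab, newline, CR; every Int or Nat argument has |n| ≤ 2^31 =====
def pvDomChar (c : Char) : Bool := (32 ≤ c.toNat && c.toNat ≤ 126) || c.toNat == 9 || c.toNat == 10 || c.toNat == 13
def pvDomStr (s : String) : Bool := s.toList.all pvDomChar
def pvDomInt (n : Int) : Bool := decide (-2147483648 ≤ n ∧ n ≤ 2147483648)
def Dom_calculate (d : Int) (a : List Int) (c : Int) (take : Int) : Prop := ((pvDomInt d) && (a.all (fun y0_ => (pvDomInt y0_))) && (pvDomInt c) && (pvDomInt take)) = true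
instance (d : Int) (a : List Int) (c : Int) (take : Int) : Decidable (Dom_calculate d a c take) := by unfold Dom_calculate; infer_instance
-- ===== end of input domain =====

-- B replaces A's pass-by-pass re-summation of the window with one scan (sum + max prefix sum)
-- and a ceiling division that locates the first crossing pass directly (alternative algorithm).


-- ===== PORT A =====
-- inner loop 'for j in range(take): _sum += a[j]; if _sum >= c: return (d//(i+1))-take+1'
-- a[j] is ported as (pyGet? a j).getD 0; Pre_ excludes the inputs where Python raises IndexError
def calcInner (a : List Int) (c d take i : Int) : List Int → Int → Option Int × Int
  | [], s => (none, s)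
  | j :: js, s =>
    let s' := s + (PySem.List.pyGet? a j).getD 0
    if c ≤ s' then (some (PySem.Int.floordiv d (i + 1) - take + 1), s')
    else calcInner a c d take i js s'

-- outer loop 'for i in range(math.ceil(d // take))' (ceil of an int is the int itself)
def calcOuter (a : List Int) (c d take : Int) : List Int → Int → Int
  | [], _ => 0
  | i :: is, s =>
    match calcInner a c d take i (PySem.List.pyRange 0 take 1) s with
    | (some r, _) => r
    | (none, s') => calcOuter a c d take is s'

def calculate (d : Int) (a : List Int) (c : Int) (take : Int) : Int :=
  calcOuter a c d take (PySem.List.pyRange 0 (PySem.Int.floordiv d take) 1) 0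

-- ===== PORT B =====
-- Source B's single scan: running sum s, running max prefix M; 'none' result = early return in pass 0
def altScan (a : List Int) (c : Int) : List Int → Int → Option Int → Option (Int × Option Int)
  | [], s, M => some (s, M)
  | j :: js, s, M =>
    let s' := s + (PySem.List.pyGet? a j).getD 0
    if c ≤ s' then none
    else altScan a c js s' (some (match M with | none => s' | some m => max m s'))

def calculate_alt (d : Int) (a : List Int) (c : Int) (take : Int) : Int :=
  let passes := PySem.Int.floordiv d take
  if passes ≤ 0 ∨ take ≤ 0 then 0
  else
    match altScan a c (PySem.List.pyRange 0 take 1) 0 none with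
    | none => d - take + 1
    | some (s, some M) =>
      if s ≤ 0 then 0
      else
        let q := -(PySem.Int.floordiv (M - c) s)
        if q ≤ passes - 1 then PySem.Int.floordiv d (q + 1) - take + 1 else 0
    | some (_, none) => 0  -- unreachable: the guard ensures the scanned range is nonempty

-- ===== PRECONDITION & SPEC =====
-- Pre_ excludes exactly the inputs where Python A raises: take = 0 (ZeroDivisionError in d // take),
-- and take > len(a) with at least one pass and no prefix of a reaching c (IndexError); B raises there too.
def Pre_calculate (d : Int) (a : List Int) (c : Int) (take : Int) : Prop :=
  take ≠ 0 ∧ (0 < take → PySem.Int.floordiv d take ≤ 0 ∨ take ≤ (a.length : Int) ∨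
    ∃ k : Nat, k < a.length ∧ c ≤ (a.take (k + 1)).sum)
instance (d : Int) (a : List Int) (c : Int) (take : Int) : Decidable (Pre_calculate d a c take) := by unfold Pre_calculate; infer_instance

def pvWitness_calculate : Int × List Int × Int × Int := (10, [3, 1], 7, 2)

def Spec_calculate (d : Int) (a : List Int) (c : Int) (take : Int) (out : Int) : Prop := out = calculate_alt d a c take
instance (d : Int) (a : List Int) (c : Int) (take : Int) (out : Int) : Decidable (Spec_calculate d a c take out) := by unfold Spec_calculate; infer_instance

-- ===== CLAIM (what is proved, stated in full; the proofs are below) =====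
def Claim_equal_calculate : Prop := ∀ (d : Int) (a : List Int) (c : Int) (take : Int), Dom_calculate d a c take → Pre_calculate d a c take → Spec_calculate d a c take (calculate d a c take)

-- ===== LEMMAS AND PROOFS =====

-- values the loops read: a[j] for j in the index list
def vmap (a : List Int) (xs : List Int) : List Int :=
  xs.map (fun j => (PySem.List.pyGet? a j).getD 0)

theorem vmap_nil (a : List Int) : vmap a [] = [] := rfl

theorem vmap_cons (a : List Int) (j : Int) (js : List Int) :
    vmap a (j :: js) = ((PySem.List.pyGet? a j).getD 0) :: vmap a js := rfl

-- maximum running sum of vs starting from accumulator s (= s itself for vs = [])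
def prefMax : List Int → Int → Int
  | [], s => s
  | x :: vs, s => max (s + x) (prefMax vs (s + x))

theorem prefMax_shift (vs : List Int) (s t : Int) : prefMax vs (s + t) = s + prefMax vs t := by
  induction vs generalizing s t with
  | nil => rfl
  | cons x vs ih => simp only [prefMax, add_assoc, ih]; omega

theorem inner_cross (a : List Int) (c d take i : Int) (xs : List Int) :
    ∀ s, xs ≠ [] → c ≤ prefMax (vmap a xs) s →
    (calcInner a c d take i xs s).1 = some (PySem.Int.floordiv d (i + 1) - take + 1) := by
  induction xs with
  | nil => intro s h; exact absurd rfl h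
  | cons j js ih =>
    intro s _ hc
    simp only [vmap_cons, prefMax] at hc
    simp only [calcInner]
    by_cases h : c ≤ s + (PySem.List.pyGet? a j).getD 0
    · simp [h]
    · rw [if_neg h]
      cases js with
      | nil => exfalso; simp only [vmap_nil, prefMax] at hc; omega
      | cons j2 js2 =>
        exact ih _ (by simp) (by omega)

theorem inner_nocross (a : List Int) (c d take i : Int) (xs : List Int) :
    ∀ s, prefMax (vmap a xs) s < c →
    calcInner a c d take i xs s = (none, s + (vmap a xs).sum) := by
  induction xs with
  | nil => intro s _; simp [calcInner, vmap_nil]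
  | cons j js ih =>
    intro s hc
    simp only [vmap_cons, prefMax, List.sum_cons] at hc ⊢
    simp only [calcInner]
    rw [if_neg (by omega), ih _ (by omega)]
    simp only [Prod.mk.injEq, true_and]
    omega

theorem alt_run (a : List Int) (c : Int) (xs : List Int) :
    ∀ s m, s ≤ m → m < c → altScan a c xs s (some m) =
      if c ≤ prefMax (vmap a xs) s then none
      else some (s + (vmap a xs).sum, some (max m (prefMax (vmap a xs) s))) := by
  induction xs with
  | nil =>
    intro s m hsm hmc
    simp only [vmap_nil, prefMax, List.sum_nil, altScan]
    rw [if_neg (by omega)]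
    simp only [Option.some.injEq, Prod.mk.injEq]
    refine ⟨by omega, by omega⟩
  | cons j js ih =>
    intro s m hsm hmc
    simp only [vmap_cons, prefMax, List.sum_cons]
    simp only [altScan]
    by_cases h : c ≤ s + (PySem.List.pyGet? a j).getD 0
    · rw [if_pos h, if_pos (by omega)]
    · rw [if_neg h, ih _ _ (le_max_right _ _) (by omega)]
      by_cases h2 : c ≤ prefMax (vmap a js) (s + (PySem.List.pyGet? a j).getD 0)
      · rw [if_pos h2, if_pos (by omega)]
      · rw [if_neg h2, if_neg (by omega)]
        simp only [Option.some.injEq, Prod.mk.injEq]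
        refine ⟨by omega, by omega⟩

-- first step of the scan, starting from M = none (used with a nonempty range)
theorem alt_run0 (a : List Int) (c : Int) (j : Int) (js : List Int) (s : Int) :
    altScan a c (j :: js) s none =
      if c ≤ prefMax (vmap a (j :: js)) s then none
      else some (s + (vmap a (j :: js)).sum, some (prefMax (vmap a (j :: js)) s)) := by
  simp only [vmap_cons, prefMax, List.sum_cons]
  simp only [altScan]
  by_cases h : c ≤ s + (PySem.List.pyGet? a j).getD 0
  · rw [if_pos h, if_pos (by omega)]
  · rw [if_neg h, alt_run a c js _ _ le_rfl (by omega)]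
    by_cases h2 : c ≤ prefMax (vmap a js) (s + (PySem.List.pyGet? a j).getD 0)
    · rw [if_pos h2, if_pos (by omega)]
    · rw [if_neg h2, if_neg (by omega)]
      simp only [Option.some.injEq, Prod.mk.injEq]
      exact ⟨by omega, trivial⟩

-- if the window range is empty (take ≤ 0), A's outer loop never changes _sum and returns 0
theorem outer_empty (a : List Int) (c d take : Int)
    (h : PySem.List.pyRange 0 take 1 = []) :
    ∀ (lst : List Int) (s : Int), calcOuter a c d take lst s = 0 := by
  intro lst
  induction lst with
  | nil => intro s; rfl
  | cons i is ih =>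
    intro s
    simp only [calcOuter, h, calcInner]
    exact ih s

-- S ≤ 0 and no crossing in pass 0: the accumulator stays ≤ 0, A never crosses
theorem outer_zero (a : List Int) (c d take : Int)
    (hM : prefMax (vmap a (PySem.List.pyRange 0 take 1)) 0 < c)
    (hS : (vmap a (PySem.List.pyRange 0 take 1)).sum ≤ 0) :
    ∀ (lst : List Int) (s : Int), s ≤ 0 → calcOuter a c d take lst s = 0 := by
  intro lst
  induction lst with
  | nil => intro s _; rfl
  | cons i is ih =>
    intro s hs
    simp only [calcOuter]
    rw [inner_nocross a c d take i _ s (by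
      have := prefMax_shift (vmap a (PySem.List.pyRange 0 take 1)) s 0
      simp only [add_zero] at this
      omega)]
    exact ih _ (by omega)

-- S > 0, no crossing in pass 0: the first crossing pass is q = ⌈(c-M)/S⌉, found by A's scan
theorem outer_pos (a : List Int) (c d take passes S M q : Int)
    (hS : S = (vmap a (PySem.List.pyRange 0 take 1)).sum)
    (hM : M = prefMax (vmap a (PySem.List.pyRange 0 take 1)) 0)
    (hq : ∀ k : Int, q ≤ k ↔ c ≤ k * S + M)
    (hne : PySem.List.pyRange 0 take 1 ≠ []) :
    ∀ (n : Nat) (k : Int), (passes - k).toNat = n → 0 ≤ k → k ≤ q →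
      calcOuter a c d take (PySem.List.pyRange k passes 1) (k * S) =
        if q ≤ passes - 1 then PySem.Int.floordiv d (q + 1) - take + 1 else 0 := by
  intro n
  induction n with
  | zero =>
    intro k hn _ hkq
    have hpk : passes ≤ k := by omega
    rw [PySem.List.pyRange_one_eq_nil hpk]
    rw [if_neg (by omega)]
    rfl
  | succ n ih =>
    intro k hn hk0 hkq
    have hkp : k < passes := by omega
    rw [PySem.List.pyRange_one_cons hkp]
    simp only [calcOuter]
    by_cases hcross : q ≤ k
    · have hkeq : k = q := le_antisymm hkq hcross
      have hc : c ≤ prefMax (vmap a (PySem.List.pyRange 0 take 1)) (k * S) := by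
        have := prefMax_shift (vmap a (PySem.List.pyRange 0 take 1)) (k * S) 0
        simp only [add_zero] at this
        have := (hq k).mp hcross
        omega
      have h1 := inner_cross a c d take k _ (k * S) hne hc
      rcases hI : calcInner a c d take k (PySem.List.pyRange 0 take 1) (k * S) with ⟨o, s2⟩
      rw [hI] at h1
      simp only at h1
      subst h1
      rw [if_pos (by omega)]
      rw [hkeq]
    · have hc : prefMax (vmap a (PySem.List.pyRange 0 take 1)) (k * S) < c := by
        have := prefMax_shift (vmap a (PySem.List.pyRange 0 take 1)) (k * S) 0
        simp only [add_zero] at this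
        have h2 := (hq k).not.mp hcross
        omega
      rw [inner_nocross a c d take k _ (k * S) hc]
      have : k * S + (vmap a (PySem.List.pyRange 0 take 1)).sum = (k + 1) * S := by
        rw [hS]; ring
      rw [this]
      exact ih (k + 1) (by omega) (by omega) (by omega)

-- ===== VERDICT (by name: the statement is the Claim_ definition above) =====
theorem calculate_spec : Claim_equal_calculate := by
  intro d a c take _ _
  unfold Spec_calculate calculate calculate_alt
  set passes := PySem.Int.floordiv d take with hpasses
  by_cases hp : passes ≤ 0 ∨ take ≤ 0
  · rw [if_pos hp]
    rcases hp with hp | hp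
    · rw [PySem.List.pyRange_one_eq_nil (by omega)]
      rfl
    · exact outer_empty a c d take (PySem.List.pyRange_one_eq_nil (by omega)) _ 0
  · rw [if_neg hp]
    have hpos : 0 < passes := by omega
    have htake : 0 < take := by omega
    -- the window range is nonempty
    have hxs : PySem.List.pyRange 0 take 1 = 0 :: PySem.List.pyRange 1 take 1 :=
      PySem.List.pyRange_one_cons (by omega)
    have hne : PySem.List.pyRange 0 take 1 ≠ [] := by rw [hxs]; simp
    set M := prefMax (vmap a (PySem.List.pyRange 0 take 1)) 0 with hM
    set S := (vmap a (PySem.List.pyRange 0 take 1)).sum with hS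
    have hscan : altScan a c (PySem.List.pyRange 0 take 1) 0 none =
        if c ≤ M then none else some (S, some M) := by
      rw [hxs, alt_run0]
      simp only [← hxs, ← hM, ← hS, zero_add]
    rw [hscan]
    by_cases hc : c ≤ M
    · -- crossing already in pass 0: both return d - take + 1
      rw [if_pos hc]
      rw [PySem.List.pyRange_one_cons (show (0:Int) < passes by omega)]
      simp only [calcOuter]
      have h1 := inner_cross a c d take 0 _ 0 hne (by omega)
      rcases hI : calcInner a c d take 0 (PySem.List.pyRange 0 take 1) 0 with ⟨o, s2⟩
      rw [hI] at h1
      simp only at h1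
      subst h1
      have : PySem.Int.floordiv d (0 + 1) = d := by
        rw [PySem.Int.floordiv_eq_ediv_of_pos (by omega)]
        simp
      rw [this]
    · rw [if_neg hc]
      dsimp only
      by_cases hSle : S ≤ 0
      · rw [if_pos hSle]
        exact outer_zero a c d take (by omega) (by omega) _ 0 le_rfl
      · rw [if_neg hSle]
        set q := -(PySem.Int.floordiv (M - c) S) with hqdef
        have hq : ∀ k : Int, q ≤ k ↔ c ≤ k * S + M := by
          intro k
          have h1 : -k ≤ PySem.Int.floordiv (M - c) S ↔ -k * S ≤ M - c :=
            PySem.Int.le_floordiv_iff_mul_le (by omega)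
          have h2 : -k * S = -(k * S) := by ring
          rw [h2] at h1
          omega
        have hq1 : 1 ≤ q := by
          have := (hq 0).not
          simp only [zero_mul, zero_add] at this
          omega
        have := outer_pos a c d take passes S M q hS hM hq hne
          (passes - 0).toNat 0 rfl le_rfl (by omega)
        simp only [zero_mul] at this
        exact this
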